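-- pv_equiv track=rewrite | github.com/hyukieee/Algorithm_Coding | 프로그래머스/1/42840. 모의고사/모의고사.py | solution
-- ===== SOURCE A (Python) =====
-- def solution(answers):
--     answer = []
--     player1 = [ 1, 2, 3, 4, 5,]
--     player2 = [ 2, 1, 2, 3, 2, 4, 2, 5,]
--     player3 = [3, 3, 1, 1, 2, 2, 4, 4, 5, 5,]
--
--     score = [0] * 3
--
--     for i in range(len(answers)):
--         if player1[i%len(player1)] == answers[i]:
--             score[0] += 1
--         if player2[i%len(player2)] == answers[i]:
--             score[1] += 1
--         if player3[i%len(player3)] == answers[i]: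
--             score[2] += 1
--
--     highscore = max(score)
--
--
--     for i in range(3):
--         if(score[i] == highscore):
--             answer.append(i+1)
--
--     return answer
-- ===== SOURCE B (Python) =====
-- def solution(answers):
--     # Histogram approach: one pass buckets answers by (index mod 40, value);
--     # each player's score is then read off the table in 40 fixed lookups.
--     cnt = {}
--     for i, a in enumerate(answers):
--         key = (i % 40, a)
--         cnt[key] = cnt.get(key, 0) + 1
--     patterns = [[1, 2, 3, 4, 5],
--                 [2, 1, 2, 3, 2, 4, 2, 5],
--                 [3, 3, 1, 1, 2, 2, 4, 4, 5, 5]]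
--     scores = [sum(cnt.get((r, p[r % len(p)]), 0) for r in range(40))
--               for p in patterns]
--     m = max(scores)
--     return [i + 1 for i, s in enumerate(scores) if s == m]
-- ===== Notes on version B (the rewrite author's own statement) =====
-- stated objective: alternative
-- what changed: Replaces the per-element loop that compares every answer against all three cyclic patterns by a one-pass histogram keyed by (index mod 40, value); each player's score is then obtained as 40 fixed table lookups (lcm of the pattern periods), so scoring no longer touches the answers at all.
import Mathlib
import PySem

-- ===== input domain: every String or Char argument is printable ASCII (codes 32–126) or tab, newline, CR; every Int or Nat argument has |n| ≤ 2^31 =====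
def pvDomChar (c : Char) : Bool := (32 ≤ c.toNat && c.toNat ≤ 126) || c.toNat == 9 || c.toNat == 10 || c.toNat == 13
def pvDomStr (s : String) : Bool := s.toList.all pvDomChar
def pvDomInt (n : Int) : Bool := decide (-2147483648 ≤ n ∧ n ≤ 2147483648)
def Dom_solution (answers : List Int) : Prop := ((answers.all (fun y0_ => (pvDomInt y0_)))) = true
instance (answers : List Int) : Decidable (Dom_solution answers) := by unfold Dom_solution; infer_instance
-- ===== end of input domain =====

-- B replaces A's per-element three-way comparison loop by a one-pass histogram keyed by
-- (index mod 40, value); each score is then 40 fixed table lookups (objective: alternative algorithm, same cost).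

-- ===== PORT A =====
-- one loop over indices, updating the three scores in a mutable triple (Python: a list of 3)
def solution (answers : List Int) : List Int :=
  let player1 : List Int := [1, 2, 3, 4, 5]
  let player2 : List Int := [2, 1, 2, 3, 2, 4, 2, 5]
  let player3 : List Int := [3, 3, 1, 1, 2, 2, 4, 4, 5, 5]
  let score :=
    (PySem.List.pyRange 0 (answers.length : Int) 1).foldl
      (fun sc i =>
        let s0 := if PySem.List.pyGetD player1 (PySem.Int.mod i (player1.length : Int)) 0
                     = PySem.List.pyGetD answers i 0 then sc.1 + 1 else sc.1
        let s1 := if PySem.List.pyGetD player2 (PySem.Int.mod i (player2.length : Int)) 0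
                     = PySem.List.pyGetD answers i 0 then sc.2.1 + 1 else sc.2.1
        let s2 := if PySem.List.pyGetD player3 (PySem.Int.mod i (player3.length : Int)) 0
                     = PySem.List.pyGetD answers i 0 then sc.2.2 + 1 else sc.2.2
        (s0, s1, s2))
      ((0 : Int), (0 : Int), (0 : Int))
  let scoreL : List Int := [score.1, score.2.1, score.2.2]
  let highscore := (PySem.List.max? scoreL (fun y => y)).getD 0
  (PySem.List.pyRange 0 3 1).foldl
    (fun ans i => if PySem.List.pyGetD scoreL i 0 = highscore then ans ++ [i + 1] else ans)
    []

-- ===== PORT B =====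
-- one pass building cnt[(i % 40, a)] += 1, then each score read off as 40 table lookups
def solution_alt (answers : List Int) : List Int :=
  let cnt :=
    (PySem.List.enumerate answers 0).foldl
      (fun d p =>
        let key : Int × Int := (PySem.Int.mod p.1 40, p.2)
        d.insert key (d.getD key 0 + 1))
      (PySem.Dict.empty : PySem.Dict (Int × Int) Int)
  let patterns : List (List Int) :=
    [[1, 2, 3, 4, 5], [2, 1, 2, 3, 2, 4, 2, 5], [3, 3, 1, 1, 2, 2, 4, 4, 5, 5]]
  let scores : List Int :=
    patterns.map (fun p =>
      ((PySem.List.pyRange 0 40 1).map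
        (fun r => cnt.getD (r, PySem.List.pyGetD p (PySem.Int.mod r (p.length : Int)) 0) 0)).sum)
  let m := (PySem.List.max? scores (fun y => y)).getD 0
  ((PySem.List.enumerate scores 0).filter (fun q => q.2 = m)).map (fun q => q.1 + 1)

-- ===== PRECONDITION & SPEC =====
def Spec_solution (answers : List Int) (out : List Int) : Prop := out = solution_alt answers
instance (answers : List Int) (out : List Int) : Decidable (Spec_solution answers out) := by unfold Spec_solution; infer_instance

-- ===== CLAIM (what is proved, stated in full; the proofs are below) =====
def Claim_equal_solution : Prop := ∀ (answers : List Int), Dom_solution answers → Spec_solution answers (solution answers)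

-- ===== LEMMAS AND PROOFS =====

-- proof-only reference count: matches of answers (from running index i) against the cyclic pattern
def pvMatchCount (pat : List Int) : Nat → List Int → Int
  | _, [] => 0
  | i, a :: rest => (if pat.getD (i % pat.length) 0 = a then 1 else 0) + pvMatchCount pat (i + 1) rest

-- appending one element adds the indicator at position (i + xs.length) mod pat.length
lemma pvMatchCount_append (pat : List Int) (x : Int) :
    ∀ (xs : List Int) (i : Nat),
      pvMatchCount pat i (xs ++ [x])
        = pvMatchCount pat i xs
          + (if pat.getD ((i + xs.length) % pat.length) 0 = x then 1 else 0) := by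
  intro xs
  induction xs with
  | nil => intro i; simp [pvMatchCount]
  | cons a rest ih =>
      intro i
      simp only [List.cons_append, pvMatchCount, List.length_cons, ih (i + 1)]
      ring_nf

-- A's score loop computes exactly the three per-pattern cyclic match counts
lemma score_fold_eq (answers : List Int) :
    (PySem.List.pyRange 0 (answers.length : Int) 1).foldl
      (fun (sc : Int × Int × Int) i =>
        (if PySem.List.pyGetD [1, 2, 3, 4, 5] (PySem.Int.mod i 5) 0
            = PySem.List.pyGetD answers i 0 then sc.1 + 1 else sc.1,
         if PySem.List.pyGetD [2, 1, 2, 3, 2, 4, 2, 5] (PySem.Int.mod i 8) 0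
            = PySem.List.pyGetD answers i 0 then sc.2.1 + 1 else sc.2.1,
         if PySem.List.pyGetD [3, 3, 1, 1, 2, 2, 4, 4, 5, 5] (PySem.Int.mod i 10) 0
            = PySem.List.pyGetD answers i 0 then sc.2.2 + 1 else sc.2.2))
      ((0 : Int), (0 : Int), (0 : Int))
    = (pvMatchCount [1, 2, 3, 4, 5] 0 answers,
       pvMatchCount [2, 1, 2, 3, 2, 4, 2, 5] 0 answers,
       pvMatchCount [3, 3, 1, 1, 2, 2, 4, 4, 5, 5] 0 answers) := by
  induction answers using List.reverseRecOn with
  | nil => simp [PySem.List.pyRange_one_eq_nil, pvMatchCount]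
  | append_singleton xs x ih =>
      have hlen : (((xs ++ [x]).length : Nat) : Int) = (xs.length : Int) + 1 := by
        simp
      have hcongr :
          (PySem.List.pyRange 0 (xs.length : Int) 1).foldl
            (fun (sc : Int × Int × Int) i =>
        (if PySem.List.pyGetD [1, 2, 3, 4, 5] (PySem.Int.mod i 5) 0
            = PySem.List.pyGetD (xs ++ [x]) i 0 then sc.1 + 1 else sc.1,
         if PySem.List.pyGetD [2, 1, 2, 3, 2, 4, 2, 5] (PySem.Int.mod i 8) 0
            = PySem.List.pyGetD (xs ++ [x]) i 0 then sc.2.1 + 1 else sc.2.1,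
         if PySem.List.pyGetD [3, 3, 1, 1, 2, 2, 4, 4, 5, 5] (PySem.Int.mod i 10) 0
            = PySem.List.pyGetD (xs ++ [x]) i 0 then sc.2.2 + 1 else sc.2.2)) ((0 : Int), (0 : Int), (0 : Int))
          = (PySem.List.pyRange 0 (xs.length : Int) 1).foldl
            (fun (sc : Int × Int × Int) i =>
        (if PySem.List.pyGetD [1, 2, 3, 4, 5] (PySem.Int.mod i 5) 0
            = PySem.List.pyGetD xs i 0 then sc.1 + 1 else sc.1,
         if PySem.List.pyGetD [2, 1, 2, 3, 2, 4, 2, 5] (PySem.Int.mod i 8) 0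
            = PySem.List.pyGetD xs i 0 then sc.2.1 + 1 else sc.2.1,
         if PySem.List.pyGetD [3, 3, 1, 1, 2, 2, 4, 4, 5, 5] (PySem.Int.mod i 10) 0
            = PySem.List.pyGetD xs i 0 then sc.2.2 + 1 else sc.2.2)) ((0 : Int), (0 : Int), (0 : Int)) := by
        apply PySem.List.foldl_congr_mem
        intro acc i hi
        have hb := (PySem.List.mem_pyRange_one.mp hi)
        have hget : PySem.List.pyGetD (xs ++ [x]) i 0 = PySem.List.pyGetD xs i 0 := by
          have hxL : i < ((xs ++ [x]).length : Int) := by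
            have := hb.2; simp; omega
          rw [PySem.List.pyGetD_eq_getElem _ 0 hb.1 hxL,
              PySem.List.pyGetD_eq_getElem _ 0 hb.1 hb.2]
          rw [List.getElem_append_left]
        simp only [hget]
      rw [hlen, PySem.List.pyRange_one_succ_right (by exact_mod_cast Nat.zero_le xs.length),
        List.foldl_append, hcongr, ih]
      have hget : PySem.List.pyGetD (xs ++ [x]) (xs.length : Int) 0 = x := by
        simp [PySem.List.pyGetD_natCast, List.getD]
      simp only [List.foldl_cons, List.foldl_nil, hget]
      rw [show (5 : Int) = ((5 : Nat) : Int) by norm_num,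
          show (8 : Int) = ((8 : Nat) : Int) by norm_num,
          show (10 : Int) = ((10 : Nat) : Int) by norm_num]
      simp only [PySem.Int.mod_natCast, PySem.List.pyGetD_natCast]
      rw [pvMatchCount_append, pvMatchCount_append, pvMatchCount_append]
      simp only [List.length_cons, List.length_nil, Nat.zero_add]
      split_ifs <;> simp_all

-- a sum of pair-match indicators over a Nodup list containing m collapses to one indicator
lemma sum_ite_pair (v : Int → Int) (m x : Int) :
    ∀ l : List Int, l.Nodup → m ∈ l →
      ((l.map (fun r => if (m, x) = (r, v r) then (1 : Int) else 0)).sum)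
        = if v m = x then 1 else 0 := by
  intro l
  induction l with
  | nil => simp
  | cons a t ih =>
      intro hnd hm
      rcases List.nodup_cons.mp hnd with ⟨ha, hndt⟩
      rcases List.mem_cons.mp hm with h | h
      · subst h
        have hz : ((t.map (fun r => if (m, x) = (r, v r) then (1:Int) else 0)).sum) = 0 := by
          apply List.sum_eq_zero
          intro y hy
          rcases List.mem_map.mp hy with ⟨r, hr, rfl⟩
          have hne : ¬ ((m, x) = (r, v r)) := by
            intro he
            rw [Prod.mk.injEq] at he
            exact ha (he.1 ▸ hr)
          simp [hne]
        simp only [List.map_cons, List.sum_cons, hz, add_zero]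
        by_cases hvx : v m = x
        · simp [hvx]
        · have : ¬ ((m, x) = (m, v m)) := by
            intro he; rw [Prod.mk.injEq] at he; exact hvx he.2.symm
          simp [this, hvx]
      · have hne : ¬ ((m, x) = (a, v a)) := by
          intro he; rw [Prod.mk.injEq] at he; exact ha (he.1 ▸ h)
        simp only [List.map_cons, List.sum_cons, hne, if_false, zero_add, ih hndt h]

-- the histogram read-off for one pattern equals the cyclic match count
lemma hist_eq_match (pat : List Int) (v : Int → Int)
    (hv : ∀ n : Nat, v (PySem.Int.mod (n : Int) 40) = pat.getD (n % pat.length) 0) :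
    ∀ answers : List Int,
      ((PySem.List.pyRange 0 40 1).map
        (fun r =>
          ((((PySem.List.enumerate answers 0).map
              (fun p => (PySem.Int.mod p.1 40, p.2))).count (r, v r) : Int)))).sum
        = pvMatchCount pat 0 answers := by
  intro answers
  induction answers using List.reverseRecOn with
  | nil => simp [PySem.List.enumerate_nil, pvMatchCount]
  | append_singleton xs x ih =>
      rw [PySem.List.enumerate_append]
      simp only [PySem.List.enumerate_cons, PySem.List.enumerate_nil, List.map_append,
        List.map_cons, List.map_nil, List.count_append]
      push_cast
      rw [PySem.List.sum_map_add_int, ih]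
      have hm : PySem.Int.mod ((xs.length : Nat) : Int) 40 = ((xs.length % 40 : Nat) : Int) := by
        exact_mod_cast PySem.Int.mod_natCast xs.length 40
      have hcount : ∀ r : Int,
          (([(PySem.Int.mod (0 + (xs.length : Int)) 40, x)].count (r, v r) : Int))
            = if ((PySem.Int.mod ((xs.length : Nat) : Int) 40), x) = (r, v r) then (1:Int) else 0 := by
        intro r
        simp only [zero_add, List.count_cons, List.count_nil]
        by_cases h : (r, v r) = ((PySem.Int.mod ((xs.length : Nat) : Int) 40), x)
        · simp [h]
        · have hk : ¬ (((PySem.Int.mod ((xs.length : Nat) : Int) 40), x) = (r, v r)) :=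
            fun he => h he.symm
          simp only [beq_iff_eq, if_neg hk, Nat.cast_zero]
      have hrw : ((PySem.List.pyRange 0 40 1).map
            (fun r => (([(PySem.Int.mod (0 + (xs.length : Int)) 40, x)].count (r, v r) : Int))))
          = (PySem.List.pyRange 0 40 1).map
            (fun r => if ((PySem.Int.mod ((xs.length : Nat) : Int) 40), x) = (r, v r) then (1:Int) else 0) := by
        exact List.map_congr_left (fun r _ => hcount r)
      rw [hrw, sum_ite_pair v _ x _ (by decide)
            (by
              rw [hm]
              rw [PySem.List.mem_pyRange_one]
              constructor
              · exact_mod_cast Nat.zero_le _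
              · exact_mod_cast Nat.mod_lt _ (by norm_num))]
      rw [pvMatchCount_append]
      rw [hv xs.length]
      simp only [Nat.zero_add]

-- the concrete 3-element tail: A's range(3) append loop = B's enumerate/filter/map comprehension
lemma phase2 (a b c h : Int) :
    (PySem.List.pyRange 0 3 1).foldl
      (fun ans i => if PySem.List.pyGetD [a, b, c] i 0 = h then ans ++ [i + 1] else ans) []
    = ((PySem.List.enumerate [a, b, c] 0).filter (fun p => p.2 = h)).map (fun p => p.1 + 1) := by
  have h3 : PySem.List.pyRange 0 3 1 = [0, 1, 2] := by decide
  rw [h3]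
  simp only [List.foldl_cons, List.foldl_nil, PySem.List.enumerate, PySem.List.pyGetD,
    PySem.List.pyGet?, PySem.List.pyIdx?, List.filter]
  norm_num
  split_ifs <;> simp_all

-- the fold building cnt in B is Counter of the mapped key list
lemma cnt_eq_counter (answers : List Int) :
    (PySem.List.enumerate answers 0).foldl
      (fun d p =>
        let key : Int × Int := (PySem.Int.mod p.1 40, p.2)
        d.insert key (d.getD key 0 + 1))
      (PySem.Dict.empty : PySem.Dict (Int × Int) Int)
    = PySem.Dict.counter
        ((PySem.List.enumerate answers 0).map (fun p => (PySem.Int.mod p.1 40, p.2))) := by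
  rw [← PySem.Dict.foldl_insert_getD_add_one_eq_counter, List.foldl_map]

-- hv hypotheses for the three concrete patterns
lemma hv1 : ∀ n : Nat, (fun r => PySem.List.pyGetD [(1:Int), 2, 3, 4, 5] (PySem.Int.mod r 5) 0)
    (PySem.Int.mod (n : Int) 40) = [(1:Int), 2, 3, 4, 5].getD (n % [(1:Int), 2, 3, 4, 5].length) 0 := by
  intro n
  simp only [List.length_cons, List.length_nil]
  rw [show (40:Int) = ((40:Nat):Int) by norm_num, show (5:Int) = ((5:Nat):Int) by norm_num]
  simp only [PySem.Int.mod_natCast, PySem.List.pyGetD_natCast]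
  rw [Nat.mod_mod_of_dvd n (by norm_num : 5 ∣ 40)]

lemma hv2 : ∀ n : Nat, (fun r => PySem.List.pyGetD [(2:Int), 1, 2, 3, 2, 4, 2, 5] (PySem.Int.mod r 8) 0)
    (PySem.Int.mod (n : Int) 40) = [(2:Int), 1, 2, 3, 2, 4, 2, 5].getD (n % [(2:Int), 1, 2, 3, 2, 4, 2, 5].length) 0 := by
  intro n
  simp only [List.length_cons, List.length_nil]
  rw [show (40:Int) = ((40:Nat):Int) by norm_num, show (8:Int) = ((8:Nat):Int) by norm_num]
  simp only [PySem.Int.mod_natCast, PySem.List.pyGetD_natCast]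
  rw [Nat.mod_mod_of_dvd n (by norm_num : 8 ∣ 40)]

lemma hv3 : ∀ n : Nat, (fun r => PySem.List.pyGetD [(3:Int), 3, 1, 1, 2, 2, 4, 4, 5, 5] (PySem.Int.mod r 10) 0)
    (PySem.Int.mod (n : Int) 40) = [(3:Int), 3, 1, 1, 2, 2, 4, 4, 5, 5].getD (n % [(3:Int), 3, 1, 1, 2, 2, 4, 4, 5, 5].length) 0 := by
  intro n
  simp only [List.length_cons, List.length_nil]
  rw [show (40:Int) = ((40:Nat):Int) by norm_num, show (10:Int) = ((10:Nat):Int) by norm_num]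
  simp only [PySem.Int.mod_natCast, PySem.List.pyGetD_natCast]
  rw [Nat.mod_mod_of_dvd n (by norm_num : 10 ∣ 40)]

-- ===== VERDICT (by name: the statement is the Claim_ definition above) =====
theorem solution_spec : Claim_equal_solution := by
  intro answers _
  unfold Spec_solution solution solution_alt
  simp only [List.length_cons, List.length_nil]
  norm_num
  have hconv : ∀ (b : Int), 0 < b → ∀ a : Int, a % b = PySem.Int.mod a b :=
    fun b hb a => (PySem.Int.mod_eq_emod_of_pos hb).symm
  simp only [hconv 5 (by norm_num), hconv 8 (by norm_num), hconv 10 (by norm_num),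
    hconv 40 (by norm_num)]
  rw [score_fold_eq, cnt_eq_counter]
  simp only [PySem.Dict.getD_counter]
  rw [hist_eq_match [(1:Int), 2, 3, 4, 5] _ hv1 answers,
      hist_eq_match [(2:Int), 1, 2, 3, 2, 4, 2, 5] _ hv2 answers,
      hist_eq_match [(3:Int), 3, 1, 1, 2, 2, 4, 4, 5, 5] _ hv3 answers]
  exact phase2 _ _ _ _
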